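-- pv_equiv track=rewrite | github.com/aysenurunal/Swe573 | app.py | _choose_best_search_hit
-- ===== SOURCE A (Python) =====
-- def _choose_best_search_hit(search_results, search_term):
--     """
--     Pick a better Wikidata entity than always taking the first result.
--     Filters out non-conceptual / media / brand / platform-ish entities.
--     """
--     if not search_results:
--         return None
--
--     skip_keywords = [
--         "database", "website", "software", "company", "organization",
--         "web service", "online", "application", "platform", "record label",
--         "brand", "corporation", "enterprise", "firm", "business",
--         "video game", "film", "movie", "album", "song", "television", "tv series",
--         "band", "musical"
--     ]
--
--     search_lower = (search_term or "").strip().lower()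
--
--     # 1) Exact label match first (and not skipped)
--     for hit in search_results:
--         label = (hit.get("label") or "").strip().lower()
--         desc = (hit.get("description") or "").strip().lower()
--         if any(k in desc for k in skip_keywords):
--             continue
--         if label == search_lower:
--             return hit
--
--     # 2) If single-word query, prefer single-word labels
--     is_single_word = len(search_lower.split()) == 1
--     if is_single_word:
--         for hit in search_results:
--             label = (hit.get("label") or "").strip().lower()
--             desc = (hit.get("description") or "").strip().lower()
--             if any(k in desc for k in skip_keywords):
--                 continue
--             if label and len(label.split()) == 1 and (search_lower in label):
--                 return hit
--
--     # 3) Otherwise, prefer label contains query (and not skipped)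
--     for hit in search_results:
--         label = (hit.get("label") or "").strip().lower()
--         desc = (hit.get("description") or "").strip().lower()
--         if any(k in desc for k in skip_keywords):
--             continue
--         if search_lower and label and (search_lower in label):
--             return hit
--
--     # 4) Fallback: first hit
--     return search_results[0]
-- ===== SOURCE B (Python) =====
-- def _choose_best_search_hit(search_results, search_term):
--     """Single pass: record the first non-skipped hit of each preference tier,
--     then pick the best tier after the loop."""
--     if not search_results:
--         return None
--
--     skip_keywords = [
--         "database", "website", "software", "company", "organization",
--         "web service", "online", "application", "platform", "record label",
--         "brand", "corporation", "enterprise", "firm", "business",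
--         "video game", "film", "movie", "album", "song", "television", "tv series",
--         "band", "musical"
--     ]
--
--     search_lower = (search_term or "").strip().lower()
--     is_single_word = len(search_lower.split()) == 1
--
--     exact_match = None
--     single_word_match = None
--     contains_match = None
--
--     for hit in search_results:
--         label = (hit.get("label") or "").strip().lower()
--         desc = (hit.get("description") or "").strip().lower()
--         if any(k in desc for k in skip_keywords):
--             continue
--         if exact_match is None and label == search_lower:
--             exact_match = hit
--         if (single_word_match is None and is_single_word and label
--                 and len(label.split()) == 1 and search_lower in label):
--             single_word_match = hit
--         if (contains_match is None and search_lower and label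
--                 and search_lower in label):
--             contains_match = hit
--
--     if exact_match is not None:
--         return exact_match
--     if single_word_match is not None:
--         return single_word_match
--     if contains_match is not None:
--         return contains_match
--     return search_results[0]
-- ===== Notes on version B (the rewrite author's own statement) =====
-- stated objective: alternative
-- what changed: Replaces A's three sequential scans over the results with a single pass that normalizes each hit once and records the first candidate of each preference tier in three slots, choosing among them after the loop.
import Mathlib
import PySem

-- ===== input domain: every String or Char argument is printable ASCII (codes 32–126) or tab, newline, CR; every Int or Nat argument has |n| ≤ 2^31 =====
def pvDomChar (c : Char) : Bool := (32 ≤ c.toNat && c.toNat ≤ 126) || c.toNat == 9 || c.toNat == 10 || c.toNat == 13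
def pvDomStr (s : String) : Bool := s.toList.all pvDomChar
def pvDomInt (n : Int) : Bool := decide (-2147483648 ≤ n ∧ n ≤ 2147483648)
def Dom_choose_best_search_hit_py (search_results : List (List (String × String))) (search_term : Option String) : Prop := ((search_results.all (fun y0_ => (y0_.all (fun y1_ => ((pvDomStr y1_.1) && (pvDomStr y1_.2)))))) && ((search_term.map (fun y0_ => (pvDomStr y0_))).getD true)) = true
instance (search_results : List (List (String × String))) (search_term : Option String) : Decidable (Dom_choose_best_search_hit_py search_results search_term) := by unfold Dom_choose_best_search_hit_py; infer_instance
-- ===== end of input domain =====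

-- B folds once over the hits, recording the first candidate of each preference tier
-- in three slots, instead of A's three sequential scans (alternative single-pass structure).

-- ===== PORT A =====
-- helpers shared by both ports (same code in Source A and Source B)
def pvSkipKeywords : List String :=
  ["database", "website", "software", "company", "organization",
   "web service", "online", "application", "platform", "record label",
   "brand", "corporation", "enterprise", "firm", "business",
   "video game", "film", "movie", "album", "song", "television", "tv series",
   "band", "musical"]

-- (hit.get(k) or "").strip().lower()
def pvNormGet (hit : List (String × String)) (k : String) : String :=
  PySem.Str.lower (PySem.Str.strip (((PySem.Dict.mk hit).get? k).getD ""))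

-- any(k in desc for k in skip_keywords)
def pvSkip (desc : String) : Bool :=
  pvSkipKeywords.any (fun k => PySem.Str.isIn k desc)

-- loop 1 of A: exact label match among non-skipped hits
def pvLoopExact (s : String) : List (List (String × String)) → Option (List (String × String))
  | [] => none
  | hit :: t =>
    let label := pvNormGet hit "label"
    let desc := pvNormGet hit "description"
    if pvSkip desc then pvLoopExact s t
    else if label = s then some hit
    else pvLoopExact s t

-- loop 2 of A: single-word label containing the query
def pvLoopSingle (s : String) : List (List (String × String)) → Option (List (String × String))
  | [] => none
  | hit :: t =>
    let label := pvNormGet hit "label"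
    let desc := pvNormGet hit "description"
    if pvSkip desc then pvLoopSingle s t
    else if label ≠ "" ∧ (PySem.Str.split₀ label).length = 1 ∧ PySem.Str.isIn s label then some hit
    else pvLoopSingle s t

-- loop 3 of A: label contains the query
def pvLoopContains (s : String) : List (List (String × String)) → Option (List (String × String))
  | [] => none
  | hit :: t =>
    let label := pvNormGet hit "label"
    let desc := pvNormGet hit "description"
    if pvSkip desc then pvLoopContains s t
    else if s ≠ "" ∧ label ≠ "" ∧ PySem.Str.isIn s label then some hit
    else pvLoopContains s t

def choose_best_search_hit_py (search_results : List (List (String × String))) (search_term : Option String) : Option (List (String × String)) :=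
  if search_results = [] then none
  else
    let search_lower := PySem.Str.lower (PySem.Str.strip (search_term.getD ""))
    match pvLoopExact search_lower search_results with
    | some hit => some hit
    | none =>
      let is_single_word := (PySem.Str.split₀ search_lower).length = 1
      match (if is_single_word then pvLoopSingle search_lower search_results else none) with
      | some hit => some hit
      | none =>
        match pvLoopContains search_lower search_results with
        | some hit => some hit
        | none => PySem.List.pyGet? search_results 0

-- ===== PORT B =====
-- one step of B's single loop: update the three first-candidate slots
def pvStep (s : String) (single : Bool)
    (acc : Option (List (String × String)) × Option (List (String × String)) × Option (List (String × String)))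
    (hit : List (String × String)) :
    Option (List (String × String)) × Option (List (String × String)) × Option (List (String × String)) :=
  let label := pvNormGet hit "label"
  let desc := pvNormGet hit "description"
  if pvSkip desc then acc
  else
    let e := if acc.1 = none ∧ label = s then some hit else acc.1
    let w := if acc.2.1 = none ∧ single = true ∧ label ≠ "" ∧ (PySem.Str.split₀ label).length = 1 ∧ PySem.Str.isIn s label then some hit else acc.2.1
    let c := if acc.2.2 = none ∧ s ≠ "" ∧ label ≠ "" ∧ PySem.Str.isIn s label then some hit else acc.2.2
    (e, w, c)

def choose_best_search_hit_py_alt (search_results : List (List (String × String))) (search_term : Option String) : Option (List (String × String)) :=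
  if search_results = [] then none
  else
    let search_lower := PySem.Str.lower (PySem.Str.strip (search_term.getD ""))
    let is_single_word := decide ((PySem.Str.split₀ search_lower).length = 1)
    let r := search_results.foldl (pvStep search_lower is_single_word) (none, none, none)
    match r.1 with
    | some hit => some hit
    | none =>
      match r.2.1 with
      | some hit => some hit
      | none =>
        match r.2.2 with
        | some hit => some hit
        | none => PySem.List.pyGet? search_results 0

-- ===== PRECONDITION & SPEC =====
def Spec_choose_best_search_hit_py (search_results : List (List (String × String))) (search_term : Option String) (out : Option (List (String × String))) : Prop := out = choose_best_search_hit_py_alt search_results search_term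
instance (search_results : List (List (String × String))) (search_term : Option String) (out : Option (List (String × String))) : Decidable (Spec_choose_best_search_hit_py search_results search_term out) := by unfold Spec_choose_best_search_hit_py; infer_instance

-- ===== CLAIM (what is proved, stated in full; the proofs are below) =====
def Claim_equal_choose_best_search_hit_py : Prop := ∀ (search_results : List (List (String × String))) (search_term : Option String), Dom_choose_best_search_hit_py search_results search_term → Spec_choose_best_search_hit_py search_results search_term (choose_best_search_hit_py search_results search_term)

-- ===== LEMMAS AND PROOFS =====

-- Invariant of B's fold: each slot is "the old slot, else the first hit this tier's scan would find".
theorem pvFoldl_eq (s : String) (single : Bool)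
    (l : List (List (String × String)))
    (e w c : Option (List (String × String))) :
    l.foldl (pvStep s single) (e, w, c) =
      (e.orElse (fun _ => pvLoopExact s l),
       w.orElse (fun _ => if single then pvLoopSingle s l else none),
       c.orElse (fun _ => pvLoopContains s l)) := by
  induction l generalizing e w c with
  | nil =>
    cases e <;> cases w <;> cases c <;>
      simp [pvLoopExact, pvLoopSingle, pvLoopContains, Option.orElse]
  | cons hit t ih =>
    simp only [List.foldl_cons, pvStep, pvLoopExact, pvLoopSingle, pvLoopContains]
    by_cases hskip : pvSkip (pvNormGet hit "description") = true
    · simp [hskip, ih]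
    · simp only [if_neg hskip, ih]
      cases e <;> cases w <;> cases c <;>
        simp [Option.orElse] <;> split_ifs <;> simp_all [Option.orElse]

theorem choose_best_search_hit_py_eq (search_results : List (List (String × String))) (search_term : Option String) :
    choose_best_search_hit_py search_results search_term =
    choose_best_search_hit_py_alt search_results search_term := by
  unfold choose_best_search_hit_py choose_best_search_hit_py_alt
  by_cases h : search_results = []
  · simp [h]
  · simp only [h, if_false]
    rw [pvFoldl_eq]
    simp only [Option.orElse, decide_eq_true_eq]

-- ===== VERDICT (by name: the statement is the Claim_ definition above) =====
theorem choose_best_search_hit_py_spec : Claim_equal_choose_best_search_hit_py := by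
  intro sr st _
  unfold Spec_choose_best_search_hit_py
  exact choose_best_search_hit_py_eq sr st
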